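-- pv_equiv track=rewrite | github.com/GabrielOprea/SAT-Solvers | SAT_Solver.py | expr_to_mat
-- ===== SOURCE A (Python) =====
-- def expr_to_mat(all_literals, expr):
--     result_mat = []
--
--     clauses = expr.split('^')
--     for i in range(0, len(clauses)):
--         crt_clause = []
--         #extract all the literals from each clause
--         literals = clauses[i].replace('(', '').replace(')', '').split('V')
--         for j in range(0, len(all_literals)):
--             #check if each literal is present in the clause, either in direct
--             #or negated form
--             direct = str(all_literals[j])
--             negated = '~' + direct
--             if direct in literals:
--                 crt_clause.append(1)
--             elif negated in literals:
--                 crt_clause.append(-1)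
--             else:
--                 crt_clause.append(0)
--         result_mat.append(crt_clause)
--     return result_mat
-- ===== SOURCE B (Python) =====
-- def expr_to_mat(all_literals, expr):
--     n = len(all_literals)
--     cols = {}
--     for j in range(n):
--         cols.setdefault(str(all_literals[j]), []).append(j)
--     result_mat = []
--     for clause in expr.split('^'):
--         tokens = clause.replace('(', '').replace(')', '').split('V')
--         row = [0] * n
--         # negated tokens first so a direct occurrence overrides (direct has precedence)
--         for t in tokens:
--             if t.startswith('~'):
--                 for j in cols.get(t[1:], []):
--                     row[j] = -1
--         for t in tokens:
--             if not t.startswith('~'):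
--                 for j in cols.get(t, []):
--                     row[j] = 1
--         result_mat.append(row)
--     return result_mat
-- ===== Notes on version B (the rewrite author's own statement) =====
-- stated objective: alternative
-- what changed: B precomputes one dict mapping each literal's string to its column indices and builds each row by scattering -1s (negated tokens) then 1s (direct tokens) into a zero row, instead of scanning the clause's token list once per literal per clause.
import Mathlib
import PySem

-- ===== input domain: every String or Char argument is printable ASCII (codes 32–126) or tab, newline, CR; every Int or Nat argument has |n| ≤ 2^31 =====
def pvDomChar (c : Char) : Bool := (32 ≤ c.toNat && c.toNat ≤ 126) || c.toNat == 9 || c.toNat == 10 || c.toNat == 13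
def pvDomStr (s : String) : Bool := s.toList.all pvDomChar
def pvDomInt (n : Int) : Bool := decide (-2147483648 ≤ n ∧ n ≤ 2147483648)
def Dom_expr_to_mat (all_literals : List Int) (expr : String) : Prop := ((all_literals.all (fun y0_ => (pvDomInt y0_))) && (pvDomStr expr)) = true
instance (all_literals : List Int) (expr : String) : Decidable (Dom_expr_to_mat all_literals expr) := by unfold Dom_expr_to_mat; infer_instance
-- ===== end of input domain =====

-- B replaces A's per-literal scan of each clause's token list by one dict from literal
-- strings to column indices and a scatter into a zero row (negated tokens first, so a
-- direct occurrence keeps A's precedence); objective: alternative algorithm, same value.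

-- ===== PORT A =====
def expr_to_mat (all_literals : List Int) (expr : String) : List (List Int) :=
  let clauses := PySem.Chars.splitOn expr.toList ['^']
  clauses.foldl (fun result_mat clause =>
    let literals := PySem.Chars.splitOn
      (PySem.Chars.replace (PySem.Chars.replace clause ['('] []) [')'] []) ['V']
    let crt_clause := all_literals.foldl (fun crt lit =>
      let direct := PySem.Int.toChars lit
      let negated := '~' :: direct
      if direct ∈ literals then crt ++ [(1 : Int)]
      else if negated ∈ literals then crt ++ [(-1 : Int)]
      else crt ++ [(0 : Int)]) []
    result_mat ++ [crt_clause]) []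

-- ===== PORT B =====
def expr_to_mat_alt (all_literals : List Int) (expr : String) : List (List Int) :=
  let n := all_literals.length
  let cols : PySem.Dict (List Char) (List Int) :=
    (PySem.List.enumerate all_literals).foldl
      (fun d p => d.modify (PySem.Int.toChars p.2) [] (fun l => l ++ [p.1]))
      PySem.Dict.empty
  (PySem.Chars.splitOn expr.toList ['^']).foldl (fun result_mat clause =>
    let tokens := PySem.Chars.splitOn
      (PySem.Chars.replace (PySem.Chars.replace clause ['('] []) [')'] []) ['V']
    let row0 := List.replicate n (0 : Int)
    -- negated tokens first so a direct occurrence overrides (direct has precedence)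
    let row1 := tokens.foldl (fun row t =>
      if PySem.Chars.startswith t ['~'] then
        (cols.getD (PySem.List.slice t (some 1) none) []).foldl
          (fun r j => PySem.List.pySetD r j (-1)) row
      else row) row0
    let row2 := tokens.foldl (fun row t =>
      if PySem.Chars.startswith t ['~'] then row
      else
        (cols.getD t []).foldl (fun r j => PySem.List.pySetD r j 1) row) row1
    result_mat ++ [row2]) []

-- ===== PRECONDITION & SPEC =====
def Spec_expr_to_mat (all_literals : List Int) (expr : String) (out : List (List Int)) : Prop := out = expr_to_mat_alt all_literals expr
instance (all_literals : List Int) (expr : String) (out : List (List Int)) : Decidable (Spec_expr_to_mat all_literals expr out) := by unfold Spec_expr_to_mat; infer_instance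

-- ===== CLAIM (what is proved, stated in full; the proofs are below) =====
def Claim_equal_expr_to_mat : Prop := ∀ (all_literals : List Int) (expr : String), Dom_expr_to_mat all_literals expr → Spec_expr_to_mat all_literals expr (expr_to_mat all_literals expr)

-- ===== LEMMAS AND PROOFS =====

-- str(n) contains no '~'
theorem digitChar_ne (m : Nat) : Nat.digitChar m ≠ '~' := by
  match m with
  | 0 => decide
  | 1 => decide
  | 2 => decide
  | 3 => decide
  | 4 => decide
  | 5 => decide
  | 6 => decide
  | 7 => decide
  | 8 => decide
  | 9 => decide
  | 10 => decide
  | 11 => decide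
  | 12 => decide
  | 13 => decide
  | 14 => decide
  | 15 => decide
  | (_ + 16) => simp [Nat.digitChar]

theorem tilde_not_mem_toDigitsCore (b fuel n : Nat) (acc : List Char)
    (h : '~' ∉ acc) : '~' ∉ Nat.toDigitsCore b fuel n acc := by
  induction fuel generalizing n acc with
  | zero => simpa [Nat.toDigitsCore] using h
  | succ fuel ih =>
    have hd : '~' ∉ (Nat.digitChar (n % b)) :: acc := by
      intro hc
      rcases List.mem_cons.1 hc with hc | hc
      · exact digitChar_ne _ hc.symm
      · exact h hc
    rw [Nat.toDigitsCore]
    split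
    · exact hd
    · exact ih _ _ hd

theorem tilde_not_mem_toChars (n : Int) : '~' ∉ PySem.Int.toChars n := by
  unfold PySem.Int.toChars
  split
  · intro hc
    rcases List.mem_cons.1 hc with hc | hc
    · exact absurd hc (by decide)
    · exact tilde_not_mem_toDigitsCore 10 _ _ [] (by simp) hc
  · exact tilde_not_mem_toDigitsCore 10 _ _ [] (by simp)

theorem startswith_toChars_tilde (n : Int) :
    PySem.Chars.startswith (PySem.Int.toChars n) ['~'] = false := by
  rw [Bool.eq_false_iff]
  intro h
  obtain ⟨t, ht⟩ := (PySem.Chars.startswith_iff (PySem.Int.toChars n) ['~']).1 h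
  exact tilde_not_mem_toChars n (by rw [← ht]; simp)

-- building the column dict: getD characterisation
theorem getD_cols_aux (l : List (Int × Int)) (d : PySem.Dict (List Char) (List Int))
    (s : List Char) :
    ((l.foldl (fun d p => d.modify (PySem.Int.toChars p.2) [] (fun xs => xs ++ [p.1])) d).getD s [])
    = d.getD s [] ++ (l.filter (fun p => PySem.Int.toChars p.2 == s)).map (fun p => p.1) := by
  induction l generalizing d with
  | nil => simp
  | cons p rest ih =>
    rw [List.foldl_cons, ih, PySem.Dict.getD_modify]
    by_cases hs : PySem.Int.toChars p.2 = s
    · simp [hs]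
    · simp [hs, Ne.symm hs]

theorem mem_cols_getD (ls : List Int) (s : List Char) (j : Int) :
    (j ∈ ((PySem.List.enumerate ls).foldl
      (fun d p => d.modify (PySem.Int.toChars p.2) [] (fun xs => xs ++ [p.1]))
      PySem.Dict.empty).getD s [])
    ↔ ∃ (k : Nat), ∃ (_ : k < ls.length),
        j = (k : Int) ∧ PySem.Int.toChars ls[k] = s := by
  rw [getD_cols_aux]
  simp only [List.mem_append, List.mem_map, List.mem_filter,
    PySem.List.mem_enumerate_iff]
  constructor
  · rintro (h | ⟨p, ⟨⟨k, hk, hp⟩, hs⟩, hj⟩)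
    · simp [PySem.Dict.getD, PySem.Dict.get?, PySem.Dict.empty] at h
    · subst hp
      exact ⟨k, hk, by simpa using hj.symm, beq_iff_eq.1 (by simpa using hs)⟩
  · rintro ⟨k, hk, hj, hs⟩
    exact Or.inr ⟨((k : Int), ls[k]), ⟨⟨k, hk, by simp⟩, by simpa using hs⟩, hj.symm⟩

-- scattering a constant value at a list of (in-range, nonnegative) indices
theorem scatter_getElem? (v : Int) (idxs : List Int) (r : List Int) (i : Nat)
    (h : ∀ j ∈ idxs, ∃ (k : Nat), j = (k : Int) ∧ k < r.length) :
    (idxs.foldl (fun r j => PySem.List.pySetD r j v) r)[i]?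
      = if (i : Int) ∈ idxs then some v else r[i]? := by
  induction idxs generalizing r with
  | nil => simp
  | cons j rest ih =>
    obtain ⟨k, rfl, hk⟩ := h _ (List.mem_cons_self ..)
    rw [List.foldl_cons, PySem.List.pySetD_natCast,
      ih (r.set k v) (by simpa using fun j hj => h j (List.mem_cons_of_mem _ hj))]
    by_cases hmem : (i : Int) ∈ rest
    · simp [hmem]
    · simp only [hmem, if_false, List.getElem?_set, List.mem_cons, or_false]
      by_cases hik : (i : Int) = (k : Int)
      · have hki : k = i := by exact_mod_cast hik.symm
        subst hki
        simp [hk]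
      · have hki : ¬ (k = i) := fun hh => hik (by simp [hh])
        simp [hik, hki]

theorem scatter_length (v : Int) (idxs : List Int) (r : List Int) :
    (idxs.foldl (fun r j => PySem.List.pySetD r j v) r).length = r.length := by
  induction idxs generalizing r with
  | nil => rfl
  | cons j rest ih => simp [ih, PySem.List.length_pySetD]

-- one conditional-scatter pass over the clause's tokens
theorem pass_getElem? (v : Int) (P : List Char → Bool) (key : List Char → List Char)
    (cols : PySem.Dict (List Char) (List Int)) (tokens : List (List Char))
    (r : List Int) (i : Nat)
    (h : ∀ s : List Char, ∀ j ∈ cols.getD s [], ∃ (k : Nat), j = (k : Int) ∧ k < r.length) :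
    (tokens.foldl (fun row t =>
        if P t then (cols.getD (key t) []).foldl
          (fun r j => PySem.List.pySetD r j v) row
        else row) r)[i]?
    = if (∃ t ∈ tokens, P t = true ∧ (i : Int) ∈ cols.getD (key t) [])
        then some v else r[i]? := by
  induction tokens generalizing r with
  | nil => simp
  | cons t rest ih =>
    rw [List.foldl_cons]
    by_cases hP : P t = true
    · have hlen : ((cols.getD (key t) []).foldl
          (fun r j => PySem.List.pySetD r j v) r).length = r.length :=
        scatter_length v _ r
      rw [if_pos hP]
      rw [ih _ (fun s j hj => by
        obtain ⟨k, hk1, hk2⟩ := h s j hj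
        exact ⟨k, hk1, by omega⟩)]
      by_cases hmem : ∃ t' ∈ rest, P t' = true ∧ (i : Int) ∈ cols.getD (key t') []
      · rw [if_pos hmem, if_pos (by
          obtain ⟨t', ht'⟩ := hmem
          exact ⟨t', List.mem_cons_of_mem _ ht'.1, ht'.2⟩)]
      · rw [if_neg hmem, scatter_getElem? v _ _ _ (h (key t))]
        by_cases hct : (i : Int) ∈ cols.getD (key t) []
        · rw [if_pos hct, if_pos ⟨t, List.mem_cons_self .., hP, hct⟩]
        · rw [if_neg hct, if_neg (by
            rintro ⟨t', ht', h1, h2⟩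
            rcases List.mem_cons.1 ht' with rfl | ht'
            · exact hct h2
            · exact hmem ⟨t', ht', h1, h2⟩)]
    · rw [if_neg hP, ih _ h]
      congr 1
      simp only [List.mem_cons, eq_iff_iff]
      constructor
      · rintro ⟨t', ht', h1, h2⟩; exact ⟨t', Or.inr ht', h1, h2⟩
      · rintro ⟨t', ht', h1, h2⟩
        rcases ht' with rfl | ht'
        · exact absurd h1 hP
        · exact ⟨t', ht', h1, h2⟩

theorem pass_length (v : Int) (P : List Char → Bool) (key : List Char → List Char)
    (cols : PySem.Dict (List Char) (List Int)) (tokens : List (List Char))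
    (r : List Int) :
    (tokens.foldl (fun row t =>
        if P t then (cols.getD (key t) []).foldl
          (fun r j => PySem.List.pySetD r j v) row
        else row) r).length = r.length := by
  induction tokens generalizing r with
  | nil => rfl
  | cons t rest ih =>
    rw [List.foldl_cons]
    split
    · rw [ih]; exact scatter_length v _ r
    · exact ih r

-- A's row equals B's row, for one clause's token list
theorem row_eq (ls : List Int) (tokens : List (List Char)) :
    ls.foldl (fun crt lit =>
      if PySem.Int.toChars lit ∈ tokens then crt ++ [(1 : Int)]
      else if '~' :: PySem.Int.toChars lit ∈ tokens then crt ++ [(-1 : Int)]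
      else crt ++ [(0 : Int)]) []
    = tokens.foldl (fun row t =>
        if PySem.Chars.startswith t ['~'] then row
        else (((PySem.List.enumerate ls).foldl
            (fun d p => d.modify (PySem.Int.toChars p.2) [] (fun xs => xs ++ [p.1]))
            PySem.Dict.empty).getD t []).foldl
          (fun r j => PySem.List.pySetD r j 1) row)
      (tokens.foldl (fun row t =>
        if PySem.Chars.startswith t ['~'] then
          (((PySem.List.enumerate ls).foldl
              (fun d p => d.modify (PySem.Int.toChars p.2) [] (fun xs => xs ++ [p.1]))
              PySem.Dict.empty).getD (PySem.List.slice t (some 1) none) []).foldl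
            (fun r j => PySem.List.pySetD r j (-1)) row
        else row) (List.replicate ls.length (0 : Int))) := by
  have hL : ls.foldl (fun crt lit =>
      if PySem.Int.toChars lit ∈ tokens then crt ++ [(1 : Int)]
      else if '~' :: PySem.Int.toChars lit ∈ tokens then crt ++ [(-1 : Int)]
      else crt ++ [(0 : Int)]) []
      = ls.map (fun lit =>
        if PySem.Int.toChars lit ∈ tokens then (1 : Int)
        else if '~' :: PySem.Int.toChars lit ∈ tokens then (-1 : Int)
        else (0 : Int)) := by
    rw [PySem.List.foldl_congr_mem ls _
      (fun crt lit => crt ++ [if PySem.Int.toChars lit ∈ tokens then (1 : Int)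
        else if '~' :: PySem.Int.toChars lit ∈ tokens then (-1 : Int) else (0 : Int)]) []
      (by intro acc x _; simp only []; split_ifs <;> rfl)]
    rw [PySem.List.foldl_append_singleton_eq_map]
    simp
  rw [hL]
  -- rewrite the direct pass to the shape of pass_getElem?
  rw [PySem.List.foldl_congr_mem tokens _
    (fun row t =>
      if (! PySem.Chars.startswith t ['~']) then
        ((((PySem.List.enumerate ls).foldl
            (fun d p => d.modify (PySem.Int.toChars p.2) [] (fun xs => xs ++ [p.1]))
            PySem.Dict.empty).getD (id t) []).foldl
          (fun r j => PySem.List.pySetD r j 1) row)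
      else row) _
    (by intro acc t _; cases h : PySem.Chars.startswith t ['~'] <;> simp [h])]
  apply List.ext_getElem?
  intro i
  have hbound : ∀ s : List Char, ∀ j ∈ ((PySem.List.enumerate ls).foldl
      (fun d p => d.modify (PySem.Int.toChars p.2) [] (fun xs => xs ++ [p.1]))
      PySem.Dict.empty).getD s [],
      ∃ (k : Nat), j = (k : Int) ∧ k < (List.replicate ls.length (0 : Int)).length := by
    intro s j hj
    obtain ⟨k, hk, h1, _⟩ := (mem_cols_getD ls s j).1 hj
    exact ⟨k, h1, by simpa using hk⟩
  have hlen1 := pass_length (-1) (fun t => PySem.Chars.startswith t ['~'])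
    (fun t => PySem.List.slice t (some 1) none)
    ((PySem.List.enumerate ls).foldl
      (fun d p => d.modify (PySem.Int.toChars p.2) [] (fun xs => xs ++ [p.1]))
      PySem.Dict.empty) tokens (List.replicate ls.length (0 : Int))
  rw [pass_getElem? 1 (fun t => ! PySem.Chars.startswith t ['~']) id _ tokens _ i
    (by rw [hlen1]; exact hbound)]
  rw [pass_getElem? (-1) (fun t => PySem.Chars.startswith t ['~'])
    (fun t => PySem.List.slice t (some 1) none) _ tokens _ i hbound]
  by_cases hi : i < ls.length
  · have hDir : (∃ t ∈ tokens, (! PySem.Chars.startswith t ['~']) = true ∧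
        (i : Int) ∈ ((PySem.List.enumerate ls).foldl
          (fun d p => d.modify (PySem.Int.toChars p.2) [] (fun xs => xs ++ [p.1]))
          PySem.Dict.empty).getD (id t) [])
        ↔ PySem.Int.toChars ls[i] ∈ tokens := by
      constructor
      · rintro ⟨t, ht, _, hmem⟩
        obtain ⟨k, hk, hik, hs⟩ := (mem_cols_getD ls (id t) (i : Int)).1 hmem
        have : k = i := by exact_mod_cast hik.symm
        subst this
        exact hs ▸ ht
      · intro ht
        exact ⟨PySem.Int.toChars ls[i], ht, by simp [startswith_toChars_tilde],
          (mem_cols_getD ls _ (i : Int)).2 ⟨i, hi, rfl, rfl⟩⟩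
    have hNeg : (∃ t ∈ tokens, PySem.Chars.startswith t ['~'] = true ∧
        (i : Int) ∈ ((PySem.List.enumerate ls).foldl
          (fun d p => d.modify (PySem.Int.toChars p.2) [] (fun xs => xs ++ [p.1]))
          PySem.Dict.empty).getD (PySem.List.slice t (some 1) none) [])
        ↔ '~' :: PySem.Int.toChars ls[i] ∈ tokens := by
      constructor
      · rintro ⟨t, ht, hP, hmem⟩
        obtain ⟨u, hu⟩ := (PySem.Chars.startswith_iff t ['~']).1 hP
        obtain ⟨k, hk, hik, hs⟩ := (mem_cols_getD ls _ (i : Int)).1 hmem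
        have hki : k = i := by exact_mod_cast hik.symm
        subst hki
        rw [PySem.List.slice_from_one] at hs
        subst hu
        simp only [List.cons_append, List.nil_append, List.tail_cons] at hs
        rw [hs]
        simpa using ht
      · intro ht
        refine ⟨'~' :: PySem.Int.toChars ls[i], ht,
          (PySem.Chars.startswith_iff _ _).2 ⟨_, rfl⟩,
          (mem_cols_getD ls _ (i : Int)).2 ⟨i, hi, rfl, ?_⟩⟩
        rw [PySem.List.slice_from_one, List.tail_cons]
    rw [List.getElem?_map]
    by_cases h1 : PySem.Int.toChars ls[i] ∈ tokens
    · rw [if_pos (hDir.mpr h1)]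
      simp [hi, h1]
    · rw [if_neg (fun hD => h1 (hDir.mp hD))]
      by_cases h2 : '~' :: PySem.Int.toChars ls[i] ∈ tokens
      · rw [if_pos (hNeg.mpr h2)]
        simp [hi, h1, h2]
      · rw [if_neg (fun hN => h2 (hNeg.mp hN))]
        simp [hi, h1, h2]
  · have hno : ∀ (key : List Char → List Char) (P : List Char → Bool),
        ¬ ∃ t ∈ tokens, P t = true ∧
          (i : Int) ∈ ((PySem.List.enumerate ls).foldl
            (fun d p => d.modify (PySem.Int.toChars p.2) [] (fun xs => xs ++ [p.1]))
            PySem.Dict.empty).getD (key t) [] := by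
      rintro key P ⟨t, _, _, hmem⟩
      obtain ⟨k, hk, hik, _⟩ := (mem_cols_getD ls _ (i : Int)).1 hmem
      have : k = i := by exact_mod_cast hik.symm
      omega
    rw [if_neg (hno id _), if_neg (hno _ _)]
    simp [hi]

-- ===== VERDICT (by name: the statement is the Claim_ definition above) =====
theorem expr_to_mat_spec : Claim_equal_expr_to_mat := by
  intro all_literals expr _
  unfold Spec_expr_to_mat
  simp only [expr_to_mat, expr_to_mat_alt]
  apply PySem.List.foldl_congr_mem
  intro acc clause _
  rw [row_eq]
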